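-- pv_equiv track=rewrite | github.com/fvconde/route-optimization | backend/constraints/__init__.py | priority_penalty
-- ===== SOURCE A (Python) =====
-- def priority_penalty(route):
--     penalty = 0
--
--     for idx, p in enumerate(route):
--         if p["priority"] == 3 and idx > 3:
--             penalty += 1000
--         elif p["priority"] == 2 and idx > 6:
--             penalty += 500
--
--     return penalty
-- ===== SOURCE B (Python) =====
-- def priority_penalty(route):
--     # Global aggregation then correction: tally all priorities in a dict in one
--     # index-free pass, charge every 3 and every 2, then refund the exempt prefix
--     # stops (first 4 for priority 3, first 7 for priority 2).
--     counts = {}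
--     for p in route:
--         pr = p["priority"]
--         counts[pr] = counts.get(pr, 0) + 1
--     total = 1000 * counts.get(3, 0) + 500 * counts.get(2, 0)
--     for p in route[:4]:
--         if p["priority"] == 3:
--             total -= 1000
--     for p in route[:7]:
--         if p["priority"] == 2:
--             total -= 500
--     return total
-- ===== Notes on version B (the rewrite author's own statement) =====
-- stated objective: alternative
-- what changed: Replaces A's positional branching loop by count-then-correct: a dict tally of all priorities built in one index-free pass charges every priority-3/2 stop, then two O(1) bounded prefix passes (route[:4], route[:7]) refund the exempt early stops.
import Mathlib
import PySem

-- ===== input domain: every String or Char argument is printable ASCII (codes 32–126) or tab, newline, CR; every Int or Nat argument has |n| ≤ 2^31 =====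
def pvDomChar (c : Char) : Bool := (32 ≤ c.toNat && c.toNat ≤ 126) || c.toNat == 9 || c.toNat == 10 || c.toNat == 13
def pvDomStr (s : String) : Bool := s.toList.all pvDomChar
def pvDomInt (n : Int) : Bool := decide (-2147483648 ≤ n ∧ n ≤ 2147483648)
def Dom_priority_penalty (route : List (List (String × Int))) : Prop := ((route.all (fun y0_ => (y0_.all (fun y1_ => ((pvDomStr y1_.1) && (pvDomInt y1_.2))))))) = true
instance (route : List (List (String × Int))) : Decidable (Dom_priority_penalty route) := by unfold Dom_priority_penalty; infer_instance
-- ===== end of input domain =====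

-- B replaces A's positional branching loop by count-then-correct: one dict tally of all
-- priorities, then two bounded prefix passes refunding the exempt early stops.
-- Shared helper: p["priority"] (first match in the association list; default irrelevant under Pre_).
def pvPrio (p : List (String × Int)) : Int := ((PySem.Dict.mk p).get? "priority").getD 0

-- ===== PORT A =====
def priority_penalty (route : List (List (String × Int))) : Int :=
  (PySem.List.enumerate route 0).foldl
    (fun penalty ip =>
      if pvPrio ip.2 == 3 && decide (ip.1 > 3) then penalty + 1000
      else if pvPrio ip.2 == 2 && decide (ip.1 > 6) then penalty + 500
      else penalty) 0

-- ===== PORT B =====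
def priority_penalty_alt (route : List (List (String × Int))) : Int :=
  let counts : PySem.Dict Int Int :=
    route.foldl (fun d p => d.insert (pvPrio p) (d.getD (pvPrio p) 0 + 1)) PySem.Dict.empty
  let total := 1000 * counts.getD 3 0 + 500 * counts.getD 2 0
  let total := (PySem.List.slice route none (some 4)).foldl
    (fun t p => if pvPrio p == 3 then t - 1000 else t) total
  let total := (PySem.List.slice route none (some 7)).foldl
    (fun t p => if pvPrio p == 2 then t - 500 else t) total
  total

-- ===== PRECONDITION & SPEC =====
-- Pre_ excludes routes with a stop lacking the "priority" key: A raises KeyError there.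
def Pre_priority_penalty (route : List (List (String × Int))) : Prop :=
  (route.all (fun p => (PySem.Dict.mk p).contains "priority")) = true
instance (route : List (List (String × Int))) : Decidable (Pre_priority_penalty route) := by
  unfold Pre_priority_penalty; infer_instance
def pvWitness_priority_penalty : (List (List (String × Int))) :=
  [[("priority", 3)], [("priority", 2)], [("priority", 1)], [("priority", 3)], [("priority", 3)]]

def Spec_priority_penalty (route : List (List (String × Int))) (out : Int) : Prop := out = priority_penalty_alt route
instance (route : List (List (String × Int))) (out : Int) : Decidable (Spec_priority_penalty route out) := by unfold Spec_priority_penalty; infer_instance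

-- ===== CLAIM (what is proved, stated in full; the proofs are below) =====
def Claim_equal_priority_penalty : Prop := ∀ (route : List (List (String × Int))), Dom_priority_penalty route → Pre_priority_penalty route → Spec_priority_penalty route (priority_penalty route)

-- ===== LEMMAS AND PROOFS =====

def pvStep (penalty : Int) (ip : Int × List (String × Int)) : Int :=
  if pvPrio ip.2 == 3 && decide (ip.1 > 3) then penalty + 1000
  else if pvPrio ip.2 == 2 && decide (ip.1 > 6) then penalty + 500
  else penalty

lemma pv_loop (route : List (List (String × Int))) : ∀ (k : ℕ) (acc : Int),
    (PySem.List.enumerate route (k : Int)).foldl pvStep acc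
      = acc + 1000 * ((route.drop (4 - k)).countP (fun p => pvPrio p == 3) : Int)
            + 500 * ((route.drop (7 - k)).countP (fun p => pvPrio p == 2) : Int) := by
  induction route with
  | nil => intro k acc; simp [PySem.List.enumerate_nil]
  | cons p rest ih =>
    intro k acc
    rw [PySem.List.enumerate_cons, List.foldl_cons]
    have hcast : ((k : Int) + 1) = ((k + 1 : ℕ) : Int) := by push_cast; ring
    rw [hcast, ih (k + 1) (pvStep acc ((k : Int), p))]
    have hstep : pvStep acc ((k : Int), p)
        = acc + (if pvPrio p == 3 ∧ 4 ≤ k then 1000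
                 else if pvPrio p == 2 ∧ 7 ≤ k then 500 else 0) := by
      simp only [pvStep]
      by_cases h3 : pvPrio p = 3 <;> by_cases h2 : pvPrio p = 2 <;>
        by_cases hk4 : 4 ≤ k <;> by_cases hk7 : 7 ≤ k <;>
        simp_all <;> omega
    rw [hstep]
    by_cases hk4 : 4 ≤ k
    · have h4 : 4 - k = 0 := by omega
      have h4' : 4 - (k + 1) = 0 := by omega
      by_cases hk7 : 7 ≤ k
      · have h7 : 7 - k = 0 := by omega
        have h7' : 7 - (k + 1) = 0 := by omega
        rw [h4, h4', h7, h7']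
        simp only [List.drop_zero, List.countP_cons]
        by_cases h3 : pvPrio p = 3 <;> by_cases h2 : pvPrio p = 2 <;>
          simp_all <;> ring
      · have h7 : 7 - k = (6 - k) + 1 := by omega
        have h7' : 7 - (k + 1) = 6 - k := by omega
        rw [h4, h4', h7, h7', List.drop_succ_cons]
        simp only [List.drop_zero, List.countP_cons]
        by_cases h3 : pvPrio p = 3 <;> by_cases h2 : pvPrio p = 2 <;>
          simp_all <;> ring
    · have hk7 : ¬ 7 ≤ k := by omega
      have h4 : 4 - k = (3 - k) + 1 := by omega
      have h4' : 4 - (k + 1) = 3 - k := by omega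
      have h7 : 7 - k = (6 - k) + 1 := by omega
      have h7' : 7 - (k + 1) = 6 - k := by omega
      rw [h4, h4', h7, h7', List.drop_succ_cons, List.drop_succ_cons]
      simp [hk4, hk7]

-- The dict tally folded with key pvPrio reads back the count of that priority.
lemma pv_counts (route : List (List (String × Int))) (v : Int) :
    (route.foldl (fun d p => d.insert (pvPrio p) (d.getD (pvPrio p) 0 + 1))
        (PySem.Dict.empty : PySem.Dict Int Int)).getD v 0
      = ((route.map pvPrio).count v : Int) := by
  have h := PySem.Dict.getD_foldl_insert_add_one (l := route.map pvPrio)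
    (d := (PySem.Dict.empty : PySem.Dict Int Int)) (v := v)
  rw [List.foldl_map] at h
  rw [h]
  simp [PySem.Dict.getD, PySem.Dict.get?, PySem.Dict.empty]

-- The refund pass subtracts w for each matching element of the prefix.
lemma pv_refund (l : List (List (String × Int))) (c w : Int) : ∀ (t0 : Int),
    l.foldl (fun t p => if pvPrio p == c then t - w else t) t0
      = t0 - w * (l.countP (fun p => pvPrio p == c) : Int) := by
  induction l with
  | nil => intro t0; simp
  | cons p rest ih =>
    intro t0
    rw [List.foldl_cons, ih, List.countP_cons]
    by_cases h : pvPrio p = c <;> simp [h] <;> push_cast <;> ring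

lemma pv_count_split (route : List (List (String × Int))) (f : List (String × Int) → Bool)
    (k : ℕ) :
    (route.countP f : Int)
      = ((route.take k).countP f : Int) + ((route.drop k).countP f : Int) := by
  conv_lhs => rw [← List.take_append_drop k route]
  rw [List.countP_append]; push_cast; ring

-- ===== VERDICT (by name: the statement is the Claim_ definition above) =====
theorem priority_penalty_spec : Claim_equal_priority_penalty := by
  intro route _ _
  show priority_penalty route = priority_penalty_alt route
  unfold priority_penalty priority_penalty_alt
  have h4 : PySem.List.slice route none (some 4) = route.take 4 := by
    have : ((4 : ℕ) : Int) = (4 : Int) := by norm_num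
    rw [← this, PySem.List.slice_to_natCast]
  have h7 : PySem.List.slice route none (some 7) = route.take 7 := by
    have : ((7 : ℕ) : Int) = (7 : Int) := by norm_num
    rw [← this, PySem.List.slice_to_natCast]
  simp only [h4, h7, pv_counts, pv_refund]
  have hA := pv_loop route 0 0
  norm_num at hA
  show (PySem.List.enumerate route 0).foldl pvStep 0 = _
  rw [hA]
  simp only [List.count_eq_countP, List.countP_map, Function.comp_def]
  rw [pv_count_split route (fun p => pvPrio p == 3) 4,
      pv_count_split route (fun p => pvPrio p == 2) 7]
  ring
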